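-- pv_equiv track=rewrite | github.com/shrikantkarve/dp-100-problems | dp_solutions.py | palindrome_partitioning_min_cuts
-- ===== SOURCE A (Python) =====
-- def palindrome_partitioning_min_cuts(s: str) -> int:
--     """44. Minimum cuts to partition string into palindromes."""
--     n = len(s)
--     is_pal = [[False] * n for _ in range(n)]
--     for i in range(n):
--         is_pal[i][i] = True
--     for i in range(n - 1):
--         is_pal[i][i+1] = s[i] == s[i+1]
--     for length in range(3, n + 1):
--         for i in range(n - length + 1):
--             j = i + length - 1
--             is_pal[i][j] = s[i] == s[j] and is_pal[i+1][j-1]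
--     dp = list(range(-1, n))
--     for i in range(n):
--         if is_pal[0][i]:
--             dp[i+1] = 0
--         else:
--             for j in range(i):
--                 if is_pal[j+1][i]:
--                     dp[i+1] = min(dp[i+1], dp[j+1] + 1)
--     return dp[n]
-- ===== SOURCE B (Python) =====
-- def palindrome_partitioning_min_cuts(s: str) -> int:
--     """Minimum cuts to partition string into palindromes.
--
--     Simpler one-pass DP over prefix lengths: no n x n palindrome table;
--     each candidate piece s[j:k] is tested directly by slice reversal."""
--     dp = [-1]
--     for k in range(1, len(s) + 1):
--         dp.append(min(dp[j] + 1 for j in range(k) if s[j:k] == s[j:k][::-1]))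
--     return dp[-1]
-- ===== Notes on version B (the rewrite author's own statement) =====
-- stated objective: simpler
-- what changed: Replaces the n-by-n palindrome DP table and the two-phase cut DP (special zero-branch plus in-place min updates over a preseeded range list) by a single forward DP over prefix lengths that tests each candidate piece directly by slice reversal.
import Mathlib
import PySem

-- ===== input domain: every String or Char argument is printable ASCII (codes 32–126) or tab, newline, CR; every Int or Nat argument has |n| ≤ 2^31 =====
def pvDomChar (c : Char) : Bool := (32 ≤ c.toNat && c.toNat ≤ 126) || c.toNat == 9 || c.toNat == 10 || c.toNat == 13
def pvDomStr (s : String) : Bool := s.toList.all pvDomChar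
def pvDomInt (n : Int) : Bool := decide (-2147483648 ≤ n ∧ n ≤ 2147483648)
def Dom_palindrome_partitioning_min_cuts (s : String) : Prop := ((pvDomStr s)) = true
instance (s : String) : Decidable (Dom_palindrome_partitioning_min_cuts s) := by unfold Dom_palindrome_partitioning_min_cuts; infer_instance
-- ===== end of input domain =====

-- B replaces A's n×n palindrome table + two-phase cut DP by one forward DP over prefix
-- lengths with a direct slice-reversal palindrome test (objective: simpler; not faster).

-- ===== PORT A =====
-- A-side helper: one assignment is_pal[a][b] = v (the Python list-of-lists viewed as a map Int → Int → Bool)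
def pvUpd (p : Int → Int → Bool) (a b : Int) (v : Bool) : Int → Int → Bool :=
  fun i j => if i = a then (if j = b then v else p i j) else p i j

def palindrome_partitioning_min_cuts (s : String) : Int :=
  let cs := s.toList
  let n : Int := (cs.length : Int)
  -- is_pal = [[False] * n for _ in range(n)]
  let isp0 : Int → Int → Bool := fun _ _ => false
  -- for i in range(n): is_pal[i][i] = True
  let isp1 := (PySem.List.pyRange 0 n 1).foldl (fun p i => pvUpd p i i true) isp0
  -- for i in range(n-1): is_pal[i][i+1] = s[i] == s[i+1]   (indices in range: pyGetD is exact here)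
  let isp2 := (PySem.List.pyRange 0 (n - 1) 1).foldl
    (fun p i => pvUpd p i (i + 1)
      (PySem.List.pyGetD cs i ' ' == PySem.List.pyGetD cs (i + 1) ' ')) isp1
  -- for length in range(3, n+1): for i in range(n-length+1): ...
  let isp := (PySem.List.pyRange 3 (n + 1) 1).foldl (fun p length =>
    (PySem.List.pyRange 0 (n - length + 1) 1).foldl (fun p i =>
      let j := i + length - 1
      pvUpd p i j
        ((PySem.List.pyGetD cs i ' ' == PySem.List.pyGetD cs j ' ') && p (i + 1) (j - 1))) p) isp2
  -- dp = list(range(-1, n))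
  let dp0 := PySem.List.pyRange (-1) n 1
  -- for i in range(n): ...
  let dp := (PySem.List.pyRange 0 n 1).foldl (fun dp i =>
    if isp 0 i then PySem.List.pySetD dp (i + 1) 0
    else (PySem.List.pyRange 0 i 1).foldl (fun dp j =>
      if isp (j + 1) i then
        PySem.List.pySetD dp (i + 1)
          (min (PySem.List.pyGetD dp (i + 1) 0) (PySem.List.pyGetD dp (j + 1) 0 + 1))
      else dp) dp) dp0
  PySem.List.pyGetD dp n 0

-- ===== PORT B =====
-- B-side helper: the candidate list 'dp[j] + 1 for j in range(k) if s[j:k] == s[j:k][::-1]'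
def pvCands (cs : List Char) (dp : List Int) (k : Int) : List Int :=
  ((PySem.List.pyRange 0 k 1).filter (fun j =>
      PySem.List.slice cs (some j) (some k)
        == (PySem.List.slice? (PySem.List.slice cs (some j) (some k)) none none (-1)).getD [])).map
    (fun j => PySem.List.pyGetD dp j 0 + 1)

def palindrome_partitioning_min_cuts_alt (s : String) : Int :=
  let cs := s.toList
  -- dp = [-1]; for k in range(1, len(s)+1): dp.append(min(...))   (the generator is never
  -- empty: j = k-1 always passes, so Python's min returns; .getD 0 is never taken)
  let dp := (PySem.List.pyRange 1 ((cs.length : Int) + 1) 1).foldl (fun dp k =>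
    dp ++ [(PySem.List.min? (pvCands cs dp k) (fun x => x)).getD 0]) [(-1 : Int)]
  PySem.List.pyGetD dp (-1) 0

-- ===== PRECONDITION & SPEC =====
def Spec_palindrome_partitioning_min_cuts (s : String) (out : Int) : Prop := out = palindrome_partitioning_min_cuts_alt s
instance (s : String) (out : Int) : Decidable (Spec_palindrome_partitioning_min_cuts s out) := by unfold Spec_palindrome_partitioning_min_cuts; infer_instance

-- ===== CLAIM (what is proved, stated in full; the proofs are below) =====
def Claim_equal_palindrome_partitioning_min_cuts : Prop := ∀ (s : String), Dom_palindrome_partitioning_min_cuts s → Spec_palindrome_partitioning_min_cuts s (palindrome_partitioning_min_cuts s)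

-- ===== LEMMAS AND PROOFS =====

lemma drop_take_decomp (cs : List Char) (a b : Nat) (h2 : a + 2 ≤ b) (hb : b ≤ cs.length) :
    (cs.drop a).take (b - a)
      = cs.getD a ' ' :: ((cs.drop (a + 1)).take (b - 1 - (a + 1)) ++ [cs.getD (b - 1) ' ']) := by
  have ha : a < cs.length := by omega
  have hb1 : b - 1 < cs.length := by omega
  have hidx : (a + 1) + (b - 1 - (a + 1)) < cs.length := by omega
  rw [List.drop_eq_getElem_cons ha]
  have h1 : b - a = (b - 1 - (a + 1) + 1) + 1 := by omega
  rw [h1, List.take_add_one, List.take_cons]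
  simp only [Nat.add_sub_cancel, List.getElem?_cons_succ, List.getElem?_drop,
    List.getElem?_eq_getElem hidx, Option.toList_some]
  rw [List.getD_eq_getElem cs ' ' ha, List.getD_eq_getElem cs ' ' hb1]
  have : a + 1 + (b - 1 - (a + 1)) = b - 1 := by omega
  simp [this]
  omega

lemma pal_cons_append (x y : Char) (m : List Char) :
    (x :: (m ++ [y]) = (x :: (m ++ [y])).reverse) ↔ (x = y ∧ m = m.reverse) := by
  constructor
  · intro h
    have hrev : (x :: (m ++ [y])).reverse = y :: (m.reverse ++ [x]) := by simp
    rw [hrev, List.cons.injEq] at h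
    obtain ⟨rfl, ht⟩ := h
    refine ⟨rfl, ?_⟩
    exact List.append_inj_left ht (by simp)
  · rintro ⟨rfl, hm⟩
    conv_lhs => rw [hm]
    simp

def PalN (cs : List Char) (a b : Nat) : Prop :=
  (cs.drop a).take (b - a) = ((cs.drop a).take (b - a)).reverse

lemma palN_single (cs : List Char) (a : Nat) : PalN cs a (a + 1) := by
  unfold PalN
  have : a + 1 - a = 1 := by omega
  rw [this]
  cases h : cs.drop a with
  | nil => simp
  | cons x t => simp

lemma palN_rec (cs : List Char) (a b : Nat) (h2 : a + 2 ≤ b) (hb : b ≤ cs.length) :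
    PalN cs a b ↔ (cs.getD a ' ' = cs.getD (b - 1) ' ' ∧ PalN cs (a + 1) (b - 1)) := by
  unfold PalN
  rw [drop_take_decomp cs a b h2 hb]
  exact pal_cons_append _ _ _

lemma palN_pair (cs : List Char) (a : Nat) (h : a + 1 < cs.length) :
    PalN cs a (a + 2) ↔ cs.getD a ' ' = cs.getD (a + 1) ' ' := by
  rw [palN_rec cs a (a+2) (by omega) (by omega)]
  have hA : a + 2 - 1 = a + 1 := by omega
  rw [hA]
  unfold PalN
  simp

lemma foldl_upd_gen (f : Int → Int) (g : Int → Bool) (p0 : Int → Int → Bool) (m : Nat)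
    (i j : Int) :
    (((PySem.List.pyRange 0 (m : Int) 1).foldl (fun p x => pvUpd p x (f x) (g x)) p0) i j)
      = if 0 ≤ i ∧ i < (m : Int) ∧ j = f i then g i else p0 i j := by
  induction m with
  | zero =>
    rw [PySem.List.pyRange_one_eq_nil (by omega)]
    simp only [List.foldl_nil]
    split_ifs with h
    · omega
    · rfl
  | succ m ih =>
    have hcast : ((m + 1 : Nat) : Int) = (m : Int) + 1 := by push_cast; ring
    rw [hcast, PySem.List.pyRange_one_succ_right (by omega), List.foldl_append]
    simp only [List.foldl_cons, List.foldl_nil]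
    set P := (PySem.List.pyRange 0 (m : Int) 1).foldl (fun p x => pvUpd p x (f x) (g x)) p0 with hP
    show (if i = (m : Int) then (if j = f (m : Int) then g (m : Int) else P i j) else P i j) = _
    by_cases hi : i = (m : Int)
    · subst hi
      by_cases hj : j = f (m : Int)
      · rw [if_pos rfl, if_pos hj, if_pos ⟨by omega, by omega, hj⟩]
      · rw [if_pos rfl, if_neg hj, ih, if_neg (fun h => hj h.2.2), if_neg (fun h => hj h.2.2)]
    · rw [if_neg hi, ih]
      by_cases h1 : 0 ≤ i ∧ i < (m : Int) ∧ j = f i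
      · rw [if_pos h1, if_pos ⟨h1.1, by omega, h1.2.2⟩]
      · rw [if_neg h1]
        by_cases h2 : 0 ≤ i ∧ i < (m : Int) + 1 ∧ j = f i
        · exact absurd ⟨h2.1, by omega, h2.2.2⟩ h1
        · rw [if_neg h2]

def tbl1 (cs : List Char) : Int → Int → Bool :=
  (PySem.List.pyRange 0 ((cs.length : Int)) 1).foldl (fun p i => pvUpd p i i true)
    (fun _ _ => false)

def tbl2 (cs : List Char) : Int → Int → Bool :=
  (PySem.List.pyRange 0 ((cs.length : Int) - 1) 1).foldl
    (fun p i => pvUpd p i (i + 1)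
      (PySem.List.pyGetD cs i ' ' == PySem.List.pyGetD cs (i + 1) ' ')) (tbl1 cs)

def InvT (cs : List Char) (L : Int) (p : Int → Int → Bool) : Prop :=
  ∀ i j : Int, p i j = true ↔
    (0 ≤ i ∧ i ≤ j ∧ j < (cs.length : Int) ∧ j - i < L ∧ PalN cs i.toNat (j.toNat + 1))

lemma getD_eq_pyGetD (cs : List Char) (i : Int) (h0 : 0 ≤ i) (h1 : i < (cs.length : Int)) :
    PySem.List.pyGetD cs i ' ' = cs.getD i.toNat ' ' := by
  rw [PySem.List.pyGetD_eq_getElem cs ' ' h0 h1, List.getD_eq_getElem cs ' ' (by omega)]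

lemma tbl1_spec (cs : List Char) (i j : Int) :
    tbl1 cs i j = if 0 ≤ i ∧ i < (cs.length : Int) ∧ j = i then true else false := by
  unfold tbl1
  exact foldl_upd_gen (fun x => x) (fun _ => true) _ cs.length i j

lemma tbl2_spec (cs : List Char) (i j : Int) :
    tbl2 cs i j = if 0 ≤ i ∧ i < (cs.length : Int) - 1 ∧ j = i + 1
      then (PySem.List.pyGetD cs i ' ' == PySem.List.pyGetD cs (i + 1) ' ')
      else tbl1 cs i j := by
  unfold tbl2
  cases hn : cs.length with
  | zero =>
    rw [hn] at *
    rw [show ((0 : Nat) : Int) - 1 = -1 by norm_num, PySem.List.pyRange_one_eq_nil (by omega)]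
    simp only [List.foldl_nil]
    split_ifs with h
    · omega
    · rfl
  | succ m =>
    rw [hn] at *
    rw [show ((m + 1 : Nat) : Int) - 1 = ((m : Nat) : Int) by push_cast; ring]
    have := foldl_upd_gen (fun x => x + 1)
      (fun x => PySem.List.pyGetD cs x ' ' == PySem.List.pyGetD cs (x + 1) ' ')
      (tbl1 cs) m i j
    rw [this]

lemma invT_base (cs : List Char) : InvT cs 2 (tbl2 cs) := by
  intro i j
  rw [tbl2_spec, tbl1_spec]
  by_cases h2 : 0 ≤ i ∧ i < (cs.length : Int) - 1 ∧ j = i + 1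
  · rw [if_pos h2]
    obtain ⟨h0, hlt, rfl⟩ := h2
    rw [getD_eq_pyGetD cs i h0 (by omega), getD_eq_pyGetD cs (i + 1) (by omega) (by omega)]
    rw [beq_iff_eq]
    have hpp := palN_pair cs i.toNat (by omega)
    rw [show (i + 1).toNat = i.toNat + 1 from by omega,
        show i.toNat + 1 + 1 = i.toNat + 2 from rfl]
    constructor
    · intro hc
      exact ⟨h0, by omega, by omega, by omega, hpp.mpr hc⟩
    · rintro ⟨-, -, -, -, hp⟩
      exact hpp.mp hp
  · rw [if_neg h2]
    by_cases h1 : 0 ≤ i ∧ i < (cs.length : Int) ∧ j = i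
    · rw [if_pos h1]
      obtain ⟨h0, hlt, hji⟩ := h1
      subst hji
      exact ⟨fun _ => ⟨h0, le_refl _, hlt, by omega, palN_single cs (Int.toNat j)⟩,
        fun _ => rfl⟩
    · rw [if_neg h1]
      refine ⟨fun hff => absurd hff (by simp), ?_⟩
      rintro ⟨hi0, hij, hjn, hd, hp⟩
      -- the pair (i, j) is in bounds with j - i < 2, so it is one of the two handled cases
      rcases (by omega : j = i ∨ j = i + 1) with rfl | rfl
      · exact (h1 ⟨hi0, hjn, rfl⟩).elim
      · exact (h2 ⟨hi0, by omega, rfl⟩).elim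

def tblStep (cs : List Char) (p : Int → Int → Bool) (length : Int) : Int → Int → Bool :=
  (PySem.List.pyRange 0 ((cs.length : Int) - length + 1) 1).foldl (fun p i =>
    let j := i + length - 1
    pvUpd p i j
      ((PySem.List.pyGetD cs i ' ' == PySem.List.pyGetD cs j ' ') && p (i + 1) (j - 1))) p

def tblA (cs : List Char) : Int → Int → Bool :=
  (PySem.List.pyRange 3 ((cs.length : Int) + 1) 1).foldl
    (fun p length => tblStep cs p length) (tbl2 cs)

lemma inner_partial (cs : List Char) (len : Int) (h3 : 3 ≤ len)
    (_hln : len ≤ (cs.length : Int)) (p : Int → Int → Bool) (hp : InvT cs (len - 1) p) :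
    ∀ (I : Nat), (I : Int) ≤ (cs.length : Int) - len + 1 →
      ∀ i j, ((PySem.List.pyRange 0 (I : Int) 1).foldl (fun p i =>
          let j := i + len - 1
          pvUpd p i j
            ((PySem.List.pyGetD cs i ' ' == PySem.List.pyGetD cs j ' ') && p (i + 1) (j - 1))) p) i j = true ↔
        (0 ≤ i ∧ i ≤ j ∧ j < (cs.length : Int) ∧
          (j - i < len - 1 ∨ (j - i = len - 1 ∧ i < (I : Int))) ∧
          PalN cs i.toNat (j.toNat + 1)) := by
  intro I
  induction I with
  | zero =>
    intro _ i j
    rw [PySem.List.pyRange_one_eq_nil (by omega)]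
    simp only [List.foldl_nil]
    rw [hp i j]
    constructor
    · rintro ⟨a, b, c, d, e⟩; exact ⟨a, b, c, Or.inl d, e⟩
    · rintro ⟨a, b, c, d, e⟩
      refine ⟨a, b, c, ?_, e⟩
      rcases d with d | d
      · exact d
      · omega
  | succ I ih =>
    intro hI i j
    have hcast : ((I + 1 : Nat) : Int) = (I : Int) + 1 := by push_cast; ring
    rw [hcast, PySem.List.pyRange_one_succ_right (by omega), List.foldl_append]
    simp only [List.foldl_cons, List.foldl_nil]
    set P := (PySem.List.pyRange 0 (I : Int) 1).foldl (fun p i =>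
        let j := i + len - 1
        pvUpd p i j
          ((PySem.List.pyGetD cs i ' ' == PySem.List.pyGetD cs j ' ') && p (i + 1) (j - 1))) p
      with hP
    have ihI := ih (by omega)
    -- the value written at cell (I, I+len-1)
    have hread : P ((I : Int) + 1) ((I : Int) + len - 1 - 1) = true ↔
        PalN cs ((I : Int) + 1).toNat (((I : Int) + len - 1 - 1).toNat + 1) := by
      rw [ihI]
      constructor
      · rintro ⟨-, -, -, -, e⟩; exact e
      · intro e; exact ⟨by omega, by omega, by omega, Or.inl (by omega), e⟩
    have hchars : ∀ (hI0 : (0:Int) ≤ I),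
        (PySem.List.pyGetD cs (I : Int) ' ' == PySem.List.pyGetD cs ((I : Int) + len - 1) ' ')
          = true ↔ cs.getD (I : Nat) ' ' = cs.getD (((I : Int) + len - 1).toNat) ' ' := by
      intro hI0
      rw [getD_eq_pyGetD cs (I : Int) (by omega) (by omega),
          getD_eq_pyGetD cs ((I : Int) + len - 1) (by omega) (by omega), beq_iff_eq]
      simp
    -- palindrome recurrence at this cell
    have hrec := palN_rec cs (I : Nat) ((I : Nat) + len.toNat) (by omega) (by omega)
    show (pvUpd P (I : Int) ((I : Int) + len - 1) _) i j = true ↔ _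
    unfold pvUpd
    by_cases hi : i = (I : Int)
    · subst hi
      by_cases hj : j = (I : Int) + len - 1
      · subst hj
        rw [if_pos rfl, if_pos rfl, Bool.and_eq_true, hread, hchars (by omega)]
        have e1 : ((I : Int) + len - 1).toNat + 1 = (I : Nat) + len.toNat := by omega
        have e2 : ((I : Int) + 1).toNat = (I : Nat) + 1 := by omega
        have e3 : (((I : Int) + len - 1 - 1).toNat + 1) = (I : Nat) + len.toNat - 1 := by omega
        have e4 : ((I : Int) + len - 1).toNat = (I : Nat) + len.toNat - 1 := by omega
        rw [e1, e2, e3, e4]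
        rw [show ((I : Nat) + len.toNat - 1) = ((I:Nat) + len.toNat - 1) from rfl]
        constructor
        · rintro ⟨hc, hpal⟩
          refine ⟨by omega, by omega, by omega, Or.inr ⟨by omega, by omega⟩, ?_⟩
          exact hrec.mpr ⟨by rw [show (I:Nat) + len.toNat - 1 = (I:Nat) + len.toNat - 1 from rfl]; exact hc, hpal⟩
        · rintro ⟨-, -, -, -, hpal⟩
          have := hrec.mp hpal
          exact ⟨this.1, this.2⟩
      · rw [if_pos rfl, if_neg hj, ihI]
        constructor
        · rintro ⟨a, b, c, d, e⟩
          refine ⟨a, b, c, ?_, e⟩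
          rcases d with d | d
          · exact Or.inl d
          · exact Or.inr ⟨d.1, by omega⟩
        · rintro ⟨a, b, c, d, e⟩
          refine ⟨a, b, c, ?_, e⟩
          rcases d with d | d
          · exact Or.inl d
          · exact Or.inr ⟨d.1, by omega⟩
    · rw [if_neg hi, ihI]
      constructor
      · rintro ⟨a, b, c, d, e⟩
        refine ⟨a, b, c, ?_, e⟩
        rcases d with d | d
        · exact Or.inl d
        · exact Or.inr ⟨d.1, by omega⟩
      · rintro ⟨a, b, c, d, e⟩
        refine ⟨a, b, c, ?_, e⟩
        rcases d with d | d
        · exact Or.inl d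
        · exact Or.inr ⟨d.1, by omega⟩

lemma inner_full (cs : List Char) (len : Int) (h3 : 3 ≤ len) (hln : len ≤ (cs.length : Int))
    (p : Int → Int → Bool) (hp : InvT cs (len - 1) p) : InvT cs len (tblStep cs p len) := by
  intro i j
  unfold tblStep
  have hb : ((cs.length : Int) - len + 1) = (((cs.length : Int) - len + 1).toNat : Int) := by omega
  rw [hb, inner_partial cs len h3 hln p hp ((cs.length : Int) - len + 1).toNat (by omega) i j]
  constructor
  · rintro ⟨a, b, c, d, e⟩
    refine ⟨a, b, c, by omega, e⟩
  · rintro ⟨a, b, c, d, e⟩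
    exact ⟨a, b, c, by omega, e⟩

lemma outer_loop (cs : List Char) : ∀ (d : Nat) (len : Int), 3 ≤ len →
    len + d = (cs.length : Int) + 1 → ∀ p, InvT cs (len - 1) p →
    InvT cs (len - 1 + d)
      ((PySem.List.pyRange len ((cs.length : Int) + 1) 1).foldl
        (fun p length => tblStep cs p length) p) := by
  intro d
  induction d with
  | zero =>
    intro len h3 hd p hp
    rw [PySem.List.pyRange_one_eq_nil (by omega)]
    simpa using hp
  | succ d ih =>
    intro len h3 hd p hp
    rw [PySem.List.pyRange_one_cons (by omega), List.foldl_cons]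
    have h1 := inner_full cs len h3 (by omega) p hp
    have h2 := ih (len + 1) (by omega) (by omega) (tblStep cs p len)
      (by simpa using h1)
    have : len + 1 - 1 + (d : Int) = len - 1 + ((d : Nat) + 1 : Nat) := by push_cast; ring
    rw [← this]
    exact h2

lemma tblA_correct (cs : List Char) (i j : Int) :
    tblA cs i j = true ↔
      (0 ≤ i ∧ i ≤ j ∧ j < (cs.length : Int) ∧ PalN cs i.toNat (j.toNat + 1)) := by
  unfold tblA
  by_cases hn : (cs.length : Int) ≤ 2
  · rw [PySem.List.pyRange_one_eq_nil (by omega)]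
    simp only [List.foldl_nil]
    rw [invT_base cs i j]
    constructor
    · rintro ⟨a, b, c, -, e⟩; exact ⟨a, b, c, e⟩
    · rintro ⟨a, b, c, e⟩; exact ⟨a, b, c, by omega, e⟩
  · have h := outer_loop cs ((cs.length : Int) - 2).toNat 3 (by omega) (by omega)
      (tbl2 cs) (by simpa using invT_base cs)
    rw [h i j]
    constructor
    · rintro ⟨a, b, c, -, e⟩; exact ⟨a, b, c, e⟩
    · rintro ⟨a, b, c, e⟩; exact ⟨a, b, c, by omega, e⟩

lemma foldl_min_min (t : List Int) : ∀ (a b : Int), t.foldl min (min a b) = min a (t.foldl min b) := by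
  induction t with
  | nil => intro a b; rfl
  | cons y t ih =>
    intro a b
    simp only [List.foldl_cons]
    rw [min_assoc, ih]

lemma foldl_if_min {α : Type} (P : α → Bool) (f : α → Int) :
    ∀ (l : List α) (a : Int),
      l.foldl (fun c x => if P x then min c (f x) else c) a = ((l.filter P).map f).foldl min a := by
  intro l
  induction l with
  | nil => intro a; rfl
  | cons x t ih =>
    intro a
    simp only [List.foldl_cons, List.filter_cons]
    by_cases hx : P x
    · rw [if_pos hx, hx]
      exact ih _
    · rw [if_neg hx, Bool.not_eq_true] at *
      rw [hx]
      exact ih a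

lemma pyGetD_pySetD_self (dp : List Int) (i : Int) (v : Int) (h0 : 0 ≤ i)
    (h1 : i < (dp.length : Int)) :
    PySem.List.pyGetD (PySem.List.pySetD dp i v) i 0 = v := by
  rw [PySem.List.pySetD_of_nonneg dp v h0,
    PySem.List.pyGetD_eq_getElem _ 0 h0 (by simp; omega)]
  rw [List.getElem_set_self]

lemma pyGetD_pySetD_other (dp : List Int) (i j : Int) (v : Int) (hne : j ≠ i) (hi : 0 ≤ i)
    (h0 : 0 ≤ j) (h1 : j < (dp.length : Int)) :
    PySem.List.pyGetD (PySem.List.pySetD dp i v) j 0 = PySem.List.pyGetD dp j 0 := by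
  rw [PySem.List.pySetD_of_nonneg dp v hi,
    PySem.List.pyGetD_eq_getElem _ 0 h0 (by simp; omega),
    PySem.List.pyGetD_eq_getElem _ 0 h0 (by omega)]
  rw [List.getElem_set_ne (by omega)]

lemma innerA (tb : Int → Int → Bool) (dp0 : List Int) (i : Int) (hi : 0 ≤ i)
    (hlen : i + 1 < (dp0.length : Int)) :
    ∀ (J : Nat), (J : Int) ≤ i →
      (PySem.List.pyRange 0 (J : Int) 1).foldl (fun dp j =>
          if tb (j + 1) i then
            PySem.List.pySetD dp (i + 1)
              (min (PySem.List.pyGetD dp (i + 1) 0) (PySem.List.pyGetD dp (j + 1) 0 + 1))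
          else dp) dp0
        = PySem.List.pySetD dp0 (i + 1)
            ((PySem.List.pyRange 0 (J : Int) 1).foldl (fun c j =>
              if tb (j + 1) i then min c (PySem.List.pyGetD dp0 (j + 1) 0 + 1) else c)
              (PySem.List.pyGetD dp0 (i + 1) 0)) := by
  intro J
  induction J with
  | zero =>
    intro _
    rw [PySem.List.pyRange_one_eq_nil (by omega)]
    simp only [List.foldl_nil]
    rw [PySem.List.pySetD_of_nonneg dp0 _ (by omega),
      PySem.List.pyGetD_eq_getElem _ 0 (by omega) hlen]
    rw [List.set_getElem_self]
  | succ J ih =>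
    intro hJ
    have hcast : ((J + 1 : Nat) : Int) = (J : Int) + 1 := by push_cast; ring
    rw [hcast, PySem.List.pyRange_one_succ_right (by omega), List.foldl_append,
      List.foldl_append]
    simp only [List.foldl_cons, List.foldl_nil]
    rw [ih (by omega)]
    set w := (PySem.List.pyRange 0 (J : Int) 1).foldl (fun c j =>
        if tb (j + 1) i then min c (PySem.List.pyGetD dp0 (j + 1) 0 + 1) else c)
        (PySem.List.pyGetD dp0 (i + 1) 0) with hw
    by_cases ht : tb ((J : Int) + 1) i
    · rw [if_pos ht, if_pos ht]
      have hlen' : (dp0.length : Int) = ((PySem.List.pySetD dp0 (i + 1) w).length : Int) := by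
        rw [PySem.List.pySetD_of_nonneg dp0 _ (by omega)]
        simp
      rw [pyGetD_pySetD_self dp0 (i + 1) w (by omega) (by omega),
        pyGetD_pySetD_other dp0 (i + 1) ((J : Int) + 1) w (by omega) (by omega) (by omega) (by omega)]
      rw [PySem.List.pySetD_of_nonneg dp0 _ (by omega),
        PySem.List.pySetD_of_nonneg _ _ (by omega), List.set_set]
      rw [PySem.List.pySetD_of_nonneg dp0 _ (by omega)]
    · rw [if_neg ht, if_neg ht]


lemma pred_char (cs : List Char) (j k : Int) (h0 : 0 ≤ j) (hk : 0 ≤ k) :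
    (PySem.List.slice cs (some j) (some k)
        == (PySem.List.slice? (PySem.List.slice cs (some j) (some k)) none none (-1)).getD [])
      = true ↔ PalN cs j.toNat k.toNat := by
  rw [PySem.List.slice?_none_none_neg_one, Option.getD_some, beq_iff_eq,
    PySem.List.slice_toNat cs h0 hk]
  exact Iff.rfl

lemma pyGetD_append_left (xs ys : List Int) (j : Int) (h0 : 0 ≤ j)
    (h : j < (xs.length : Int)) :
    PySem.List.pyGetD (xs ++ ys) j 0 = PySem.List.pyGetD xs j 0 := by
  rw [PySem.List.pyGetD_eq_getElem _ 0 h0 (by simp; omega),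
    PySem.List.pyGetD_eq_getElem _ 0 h0 h, List.getElem_append_left (by omega)]

lemma pyGetD_append_cons (xs ys : List Int) (v : Int) :
    PySem.List.pyGetD (xs ++ v :: ys) (xs.length : Int) 0 = v := by
  rw [PySem.List.pyGetD_eq_getElem _ 0 (by omega) (by simp)]
  rw [List.getElem_append_right (by simp)]
  simp

lemma mem_cands (cs : List Char) (dp : List Int) (k : Int) (x : Int) :
    x ∈ pvCands cs dp k ↔ ∃ j : Int, 0 ≤ j ∧ j < k ∧ PalN cs j.toNat k.toNat ∧
      x = PySem.List.pyGetD dp j 0 + 1 := by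
  unfold pvCands
  rw [List.mem_map]
  constructor
  · rintro ⟨j, hj, rfl⟩
    rw [List.mem_filter] at hj
    obtain ⟨hjr, hjp⟩ := hj
    rw [PySem.List.mem_pyRange_one] at hjr
    exact ⟨j, hjr.1, hjr.2, (pred_char cs j k hjr.1 (by omega)).mp hjp, rfl⟩
  · rintro ⟨j, hj0, hjk, hp, rfl⟩
    exact ⟨j, List.mem_filter.mpr ⟨PySem.List.mem_pyRange_one.mpr ⟨hj0, hjk⟩,
      (pred_char cs j k hj0 (by omega)).mpr hp⟩, rfl⟩

lemma cands_elem_bound (cs : List Char) (B : List Int) (m : Nat)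
    (hB0 : PySem.List.pyGetD B 0 0 = -1)
    (hBj : ∀ jn : Nat, 1 ≤ jn → jn ≤ m →
      0 ≤ PySem.List.pyGetD B (jn : Int) 0 ∧ PySem.List.pyGetD B (jn : Int) 0 ≤ (jn : Int) - 1)
    (x : Int) (hx : x ∈ pvCands cs B ((m : Int) + 1)) :
    0 ≤ x ∧ x ≤ (m : Int) := by
  rw [mem_cands] at hx
  obtain ⟨j, hj0, hjk, -, rfl⟩ := hx
  by_cases hj : j = 0
  · subst hj
    rw [hB0]
    constructor <;> omega
  · have h1 : 1 ≤ j.toNat := by omega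
    have h2 : j.toNat ≤ m := by omega
    have := hBj j.toNat h1 h2
    rw [show ((j.toNat : Nat) : Int) = j from by omega] at this
    constructor <;> omega

lemma cands_pal_case (cs : List Char) (B : List Int) (m : Nat)
    (hB0 : PySem.List.pyGetD B 0 0 = -1)
    (hBj : ∀ jn : Nat, 1 ≤ jn → jn ≤ m →
      0 ≤ PySem.List.pyGetD B (jn : Int) 0 ∧ PySem.List.pyGetD B (jn : Int) 0 ≤ (jn : Int) - 1)
    (hpal : PalN cs 0 (m + 1)) :
    (PySem.List.min? (pvCands cs B ((m : Int) + 1)) (fun x => x)).getD 0 = 0 := by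
  have hmem : (0 : Int) ∈ pvCands cs B ((m : Int) + 1) := by
    rw [mem_cands]
    refine ⟨0, le_refl _, by omega, by simpa using hpal, by rw [hB0]; ring⟩
  cases hc : pvCands cs B ((m : Int) + 1) with
  | nil => rw [hc] at hmem; simp at hmem
  | cons x t =>
    rw [PySem.List.min?_id_cons, Option.getD_some]
    have hmin := PySem.List.min?_mem (PySem.List.min?_id_cons x t)
    have hle := PySem.List.min?_isMin (PySem.List.min?_id_cons x t)
    have h1 : 0 ≤ t.foldl min x := by
      have := cands_elem_bound cs B m hB0 hBj _ (hc ▸ hmin)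
      exact this.1
    have h2 : t.foldl min x ≤ 0 := hle 0 (hc ▸ hmem)
    omega

lemma cands_shift (cs : List Char) (B : List Int) (m : Nat)
    (hmlt : (m : Int) < (cs.length : Int)) (hnp : ¬ PalN cs 0 (m + 1)) :
    pvCands cs B ((m : Int) + 1)
      = ((PySem.List.pyRange 0 (m : Int) 1).filter (fun j => tblA cs (j + 1) (m : Int))).map
          (fun j => PySem.List.pyGetD B (j + 1) 0 + 1) := by
  unfold pvCands
  have hc1 : ((m : Int) + 1) = ((m + 1 : Nat) : Int) := by push_cast; ring
  rw [hc1, PySem.List.pyRange_one, PySem.List.pyRange_one]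
  rw [show (((m + 1 : Nat) : Int) - 0).toNat = m + 1 from by omega,
    show (((m : Nat) : Int) - 0).toNat = m from by omega]
  rw [List.range_succ_eq_map]
  simp only [List.map_cons, List.map_map, List.filter_cons]
  have hP0 : (PySem.List.slice cs (some (0 + ((0:Nat) : Int))) (some ((m + 1 : Nat) : Int))
      == (PySem.List.slice? (PySem.List.slice cs (some (0 + ((0:Nat) : Int))) (some ((m + 1 : Nat) : Int)))
          none none (-1)).getD []) = false := by
    rw [Bool.eq_false_iff]
    intro hP
    rw [show (0 + ((0:Nat) : Int)) = 0 from by ring] at hP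
    rw [pred_char cs 0 ((m + 1 : Nat) : Int) (le_refl _) (by omega)] at hP
    rw [show ((0:Int)).toNat = 0 from rfl, show (((m + 1 : Nat) : Int)).toNat = m + 1 from by omega] at hP
    exact hnp hP
  rw [hP0]
  simp only [Bool.false_eq_true, if_false]
  rw [List.filter_map, List.filter_map, List.map_map, List.map_map]
  have hfil : (List.range m).filter
        ((fun j => PySem.List.slice cs (some j) (some ((m + 1 : Nat) : Int))
          == (PySem.List.slice? (PySem.List.slice cs (some j) (some ((m + 1 : Nat) : Int))) none none (-1)).getD [])
          ∘ ((fun (k : Nat) => 0 + (k : Int)) ∘ Nat.succ))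
      = (List.range m).filter ((fun j => tblA cs (j + 1) (m : Int)) ∘ fun (k : Nat) => 0 + (k : Int)) := by
    apply List.filter_congr
    intro k hk
    rw [List.mem_range] at hk
    simp only [Function.comp_apply, Nat.succ_eq_add_one]
    apply Bool.coe_iff_coe.mp
    rw [pred_char cs _ _ (by omega) (by omega), tblA_correct]
    rw [show ((0 : Int) + ((k + 1 : Nat) : Int)).toNat = k + 1 from by omega,
      show (((m + 1 : Nat) : Int)).toNat = m + 1 from by omega,
      show ((m : Nat) : Int).toNat = m from by omega]
    constructor
    · intro hp
      exact ⟨by omega, by omega, by omega, by rw [show (0 + ((k:Nat) : Int) + 1).toNat = k + 1 from by omega]; exact hp⟩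
    · rintro ⟨-, -, -, hp⟩
      rw [show (0 + ((k:Nat) : Int) + 1).toNat = k + 1 from by omega] at hp
      exact hp
  rw [hfil]
  apply List.map_congr_left
  intro k hk
  simp only [Function.comp_apply, Nat.succ_eq_add_one]
  have : (0 : Int) + ((k + 1 : Nat) : Int) = 0 + (k : Int) + 1 := by push_cast; ring
  rw [this]

lemma cands_notpal_case (cs : List Char) (B : List Int) (m : Nat)
    (hmlt : (m : Int) < (cs.length : Int)) (hnp : ¬ PalN cs 0 (m + 1))
    (hB0 : PySem.List.pyGetD B 0 0 = -1)
    (hBj : ∀ jn : Nat, 1 ≤ jn → jn ≤ m →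
      0 ≤ PySem.List.pyGetD B (jn : Int) 0 ∧ PySem.List.pyGetD B (jn : Int) 0 ≤ (jn : Int) - 1) :
    (PySem.List.pyRange 0 (m : Int) 1).foldl (fun c j =>
        if tblA cs (j + 1) (m : Int) then min c (PySem.List.pyGetD B (j + 1) 0 + 1) else c)
      (m : Int)
    = (PySem.List.min? (pvCands cs B ((m : Int) + 1)) (fun x => x)).getD 0 := by
  rw [foldl_if_min, ← cands_shift cs B m hmlt hnp]
  have hmem : PySem.List.pyGetD B (m : Int) 0 + 1 ∈ pvCands cs B ((m : Int) + 1) := by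
    rw [mem_cands]
    exact ⟨(m : Int), by omega, by omega,
      by rw [show ((m : Int)).toNat = m from by omega, show (((m : Int)) + 1).toNat = m + 1 from by omega]
         exact palN_single cs m, rfl⟩
  cases hc : pvCands cs B ((m : Int) + 1) with
  | nil => rw [hc] at hmem; simp at hmem
  | cons x t =>
    rw [PySem.List.min?_id_cons, Option.getD_some, List.foldl_cons, foldl_min_min]
    have hminmem := PySem.List.min?_mem (PySem.List.min?_id_cons x t)
    have := cands_elem_bound cs B m hB0 hBj _ (hc ▸ hminmem)
    exact min_eq_right this.2

def dpB (cs : List Char) (m : Nat) : List Int :=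
  (PySem.List.pyRange 1 ((m : Int) + 1) 1).foldl (fun dp k =>
    dp ++ [(PySem.List.min? (pvCands cs dp k) (fun x => x)).getD 0]) [(-1 : Int)]

lemma cands_getD_bounds (cs : List Char) (B : List Int) (m : Nat)
    (hB0 : PySem.List.pyGetD B 0 0 = -1)
    (hBj : ∀ jn : Nat, 1 ≤ jn → jn ≤ m →
      0 ≤ PySem.List.pyGetD B (jn : Int) 0 ∧ PySem.List.pyGetD B (jn : Int) 0 ≤ (jn : Int) - 1) :
    0 ≤ (PySem.List.min? (pvCands cs B ((m : Int) + 1)) (fun x => x)).getD 0 ∧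
      (PySem.List.min? (pvCands cs B ((m : Int) + 1)) (fun x => x)).getD 0 ≤ (m : Int) := by
  have hmem : PySem.List.pyGetD B (m : Int) 0 + 1 ∈ pvCands cs B ((m : Int) + 1) := by
    rw [mem_cands]
    exact ⟨(m : Int), by omega, by omega,
      by rw [show ((m : Int)).toNat = m from by omega, show (((m : Int)) + 1).toNat = m + 1 from by omega]
         exact palN_single cs m, rfl⟩
  cases hc : pvCands cs B ((m : Int) + 1) with
  | nil => rw [hc] at hmem; simp at hmem
  | cons x t =>
    rw [PySem.List.min?_id_cons, Option.getD_some]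
    have hminmem := PySem.List.min?_mem (PySem.List.min?_id_cons x t)
    exact cands_elem_bound cs B m hB0 hBj _ (hc ▸ hminmem)

lemma dpB_succ (cs : List Char) (m : Nat) :
    dpB cs (m + 1) = dpB cs m ++
      [(PySem.List.min? (pvCands cs (dpB cs m) ((m : Int) + 1)) (fun x => x)).getD 0] := by
  unfold dpB
  rw [show ((m + 1 : Nat) : Int) + 1 = ((m : Int) + 1) + 1 from by push_cast; ring,
    PySem.List.pyRange_one_succ_right (by omega), List.foldl_append]
  simp only [List.foldl_cons, List.foldl_nil]

lemma dp_main (cs : List Char) : ∀ m : Nat, m ≤ cs.length →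
    ((PySem.List.pyRange 0 (m : Int) 1).foldl (fun dp i =>
        if tblA cs 0 i then PySem.List.pySetD dp (i + 1) 0
        else (PySem.List.pyRange 0 i 1).foldl (fun dp j =>
          if tblA cs (j + 1) i then
            PySem.List.pySetD dp (i + 1)
              (min (PySem.List.pyGetD dp (i + 1) 0) (PySem.List.pyGetD dp (j + 1) 0 + 1))
          else dp) dp)
      (PySem.List.pyRange (-1) (cs.length : Int) 1)
      = dpB cs m ++ PySem.List.pyRange (m : Int) (cs.length : Int) 1)
    ∧ (dpB cs m).length = m + 1
    ∧ PySem.List.pyGetD (dpB cs m) 0 0 = -1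
    ∧ (∀ jn : Nat, 1 ≤ jn → jn ≤ m →
        0 ≤ PySem.List.pyGetD (dpB cs m) (jn : Int) 0 ∧
          PySem.List.pyGetD (dpB cs m) (jn : Int) 0 ≤ (jn : Int) - 1) := by
  intro m
  induction m with
  | zero =>
    intro _
    refine ⟨?_, rfl, rfl, fun jn h1 h2 => by omega⟩
    have h0 : PySem.List.pyRange 0 ((0 : Nat) : Int) 1 = [] :=
      PySem.List.pyRange_one_eq_nil (by omega)
    rw [h0, List.foldl_nil,
      PySem.List.pyRange_one_append (-1) 0 (cs.length : Int) (by omega) (by omega)]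
    have hd : dpB cs 0 = [(-1 : Int)] := by
      unfold dpB
      rw [show ((0 : Nat) : Int) + 1 = 1 from by norm_num,
        PySem.List.pyRange_one_eq_nil (by omega), List.foldl_nil]
    rw [hd, show ((0 : Nat) : Int) = (0 : Int) from by norm_num]
    congr 1

  | succ m ih =>
    intro hm
    obtain ⟨hA, hlen, hB0, hBj⟩ := ih (by omega)
    have hmlt : (m : Int) < (cs.length : Int) := by omega
    have hcast : ((m + 1 : Nat) : Int) = (m : Int) + 1 := by push_cast; ring
    have htail : PySem.List.pyRange (m : Int) (cs.length : Int) 1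
        = (m : Int) :: PySem.List.pyRange ((m : Int) + 1) (cs.length : Int) 1 :=
      PySem.List.pyRange_one_cons (by omega)
    -- the A-side state before step m
    set AD := dpB cs m ++ PySem.List.pyRange (m : Int) (cs.length : Int) 1 with hAD
    have hADlen : (AD.length : Int) = (cs.length : Int) + 1 := by
      rw [hAD]
      rw [List.length_append, PySem.List.length_pyRange_one]
      push_cast [hlen]
      omega
    have hADmid : PySem.List.pyGetD AD ((m : Int) + 1) 0 = (m : Int) := by
      rw [hAD, htail, show ((m : Int) + 1) = ((dpB cs m).length : Int) from by rw [hlen]; push_cast; ring]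
      exact pyGetD_append_cons _ _ _
    have hpal := tblA_correct cs 0 (m : Int)
    rw [hcast, PySem.List.pyRange_one_succ_right (by omega), List.foldl_append, hA]
    simp only [List.foldl_cons, List.foldl_nil]
    rw [dpB_succ cs m]
    set vB := (PySem.List.min? (pvCands cs (dpB cs m) ((m : Int) + 1)) (fun x => x)).getD 0
      with hvB
    have hvBb : 0 ≤ vB ∧ vB ≤ (m : Int) := cands_getD_bounds cs (dpB cs m) m hB0 hBj
    have hset : ∀ v : Int, PySem.List.pySetD AD ((m : Int) + 1) v
        = (dpB cs m ++ [v]) ++ PySem.List.pyRange ((m : Int) + 1) (cs.length : Int) 1 := by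
      intro v
      rw [hAD, htail, PySem.List.pySetD_of_nonneg _ _ (by omega),
        List.set_append_right _ _ (by rw [hlen]; omega)]
      rw [show ((m : Int) + 1).toNat - (dpB cs m).length = 0 from by rw [hlen]; omega]
      simp
    have hinvs : (dpB cs m ++ [vB]).length = m + 1 + 1 ∧
        PySem.List.pyGetD (dpB cs m ++ [vB]) 0 0 = -1 ∧
        (∀ jn : Nat, 1 ≤ jn → jn ≤ m + 1 →
          0 ≤ PySem.List.pyGetD (dpB cs m ++ [vB]) (jn : Int) 0 ∧
            PySem.List.pyGetD (dpB cs m ++ [vB]) (jn : Int) 0 ≤ (jn : Int) - 1) := by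
      refine ⟨by simp [hlen], ?_, ?_⟩
      · rw [pyGetD_append_left _ _ 0 (by omega) (by rw [hlen]; omega)]
        exact hB0
      · intro jn h1 h2
        by_cases hj : jn ≤ m
        · rw [pyGetD_append_left _ _ (jn : Int) (by omega) (by rw [hlen]; omega)]
          exact hBj jn h1 hj
        · have : jn = m + 1 := by omega
          subst this
          rw [show ((m + 1 : Nat) : Int) = ((dpB cs m).length : Int) from by rw [hlen]]
          rw [show (dpB cs m ++ [vB]) = dpB cs m ++ vB :: [] from rfl, pyGetD_append_cons]
          omega
    by_cases hp : PalN cs 0 (m + 1)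
    · -- palindromic prefix: A writes 0, B's min is 0
      have htb : tblA cs 0 (m : Int) = true :=
        hpal.mpr ⟨by omega, by omega, by omega, by simp only [Int.toNat_zero, Int.toNat_natCast]; exact hp⟩
      rw [htb, if_pos rfl]
      have hv0 : vB = 0 := cands_pal_case cs (dpB cs m) m hB0 hBj hp
      rw [hv0] at hinvs ⊢
      rw [hset 0]
      exact ⟨rfl, hinvs⟩
    · -- not a palindromic prefix: A folds min updates, B takes the min of the candidates
      have htb : tblA cs 0 (m : Int) = false := by
        rw [Bool.eq_false_iff]
        intro h
        rw [hpal] at h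
        exact hp (by simpa using h.2.2.2)
      rw [htb]
      simp only [Bool.false_eq_true, if_false]
      rw [show (m : Int) = ((m : Nat) : Int) from rfl,
        innerA (tblA cs) AD (m : Int) (by omega) (by omega) m (by omega)]
      rw [hADmid]
      have hreads : (PySem.List.pyRange 0 (m : Int) 1).foldl (fun c j =>
            if tblA cs (j + 1) (m : Int) then
              min c (PySem.List.pyGetD AD (j + 1) 0 + 1) else c) (m : Int)
          = (PySem.List.pyRange 0 (m : Int) 1).foldl (fun c j =>
            if tblA cs (j + 1) (m : Int) then
              min c (PySem.List.pyGetD (dpB cs m) (j + 1) 0 + 1) else c) (m : Int) := by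
        apply PySem.List.foldl_congr_mem
        intro acc x hx
        rw [PySem.List.mem_pyRange_one] at hx
        rw [hAD, pyGetD_append_left _ _ (x + 1) (by omega) (by rw [hlen]; omega)]
      rw [hreads, cands_notpal_case cs (dpB cs m) m hmlt hp hB0 hBj, ← hvB, hset vB]
      exact ⟨rfl, hinvs⟩

lemma portA_eval (s : String) : palindrome_partitioning_min_cuts s
    = PySem.List.pyGetD
        ((PySem.List.pyRange 0 ((s.toList.length : Int)) 1).foldl (fun dp i =>
          if tblA s.toList 0 i then PySem.List.pySetD dp (i + 1) 0
          else (PySem.List.pyRange 0 i 1).foldl (fun dp j =>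
            if tblA s.toList (j + 1) i then
              PySem.List.pySetD dp (i + 1)
                (min (PySem.List.pyGetD dp (i + 1) 0) (PySem.List.pyGetD dp (j + 1) 0 + 1))
            else dp) dp)
          (PySem.List.pyRange (-1) (s.toList.length : Int) 1))
        ((s.toList.length : Int)) 0 := rfl

lemma portB_eval (s : String) : palindrome_partitioning_min_cuts_alt s
    = PySem.List.pyGetD (dpB s.toList s.toList.length) (-1) 0 := rfl

lemma final_eq (s : String) :
    palindrome_partitioning_min_cuts s = palindrome_partitioning_min_cuts_alt s := by
  rw [portA_eval, portB_eval]
  obtain ⟨hA, hlen, -, -⟩ := dp_main s.toList s.toList.length (le_refl _)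
  rw [hA, PySem.List.pyRange_one_eq_nil (le_refl _), List.append_nil]
  have hne : dpB s.toList s.toList.length ≠ [] := by
    intro h
    rw [h] at hlen
    simp at hlen
  rw [PySem.List.pyGetD_neg_one _ 0 hne,
    PySem.List.pyGetD_eq_getElem _ 0 (by omega) (by rw [hlen]; push_cast; omega),
    List.getLast_eq_getElem]
  exact getElem_congr rfl (by rw [hlen]; omega) _

-- ===== VERDICT (by name: the statement is the Claim_ definition above) =====
theorem palindrome_partitioning_min_cuts_spec : Claim_equal_palindrome_partitioning_min_cuts := by
  intro s _
  show palindrome_partitioning_min_cuts s = palindrome_partitioning_min_cuts_alt s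
  exact final_eq s
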